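-- pv_equiv track=rewrite | github.com/maselvaggi/NBA-Prediction-Model | advanced.py | adv_format_rows
-- ===== SOURCE A (Python) =====
-- def adv_format_rows(A_box_scores):
--     """
--     The newly created list of lists is then cleaned according to if the player has a suffix
--     in their name or not.  The end goal is to create uniform length lists with which to create
--     a dataframe to then save to a .csv.
--     """
--     for i in range(len(A_box_scores)):
--         player = []
--
--         #Some players have a suffix such as Jr., Sr., 'II', 'III', etc
--         #When splitting each line by space, those player with a suffix
--         #will have an extra element length wise
--         if len(A_box_scores[i]) == 23:
--             player.append(A_box_scores[i][0])
--             player.append(A_box_scores[i][1])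
--
--             if A_box_scores[i][3] == "@":
--                 player.append("A")
--             else:
--                 player.append("H")
--
--             player.append(A_box_scores[i][4])
--
--             for j in range(5, len(A_box_scores[i])):
--                 player.append(A_box_scores[i][j])
--
--         elif len(A_box_scores[i]) == 24:
--             player.append(A_box_scores[i][0] + " " + A_box_scores[i][1])
--             player.append(A_box_scores[i][2])
--
--             if A_box_scores[i][4] == "@":
--                 player.append("A")
--             else:
--                 player.append("H")
--
--             player.append(A_box_scores[i][5])
--
--             for j in range(6, len(A_box_scores[i])):
--                 player.append(A_box_scores[i][j])
--
--         elif len(A_box_scores[i]) == 25: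
--             player.append(A_box_scores[i][0] + " " + A_box_scores[i][1] + " " + A_box_scores[i][2])
--             player.append(A_box_scores[i][3])
--
--             if A_box_scores[i][5] == "@":
--                 player.append("A")
--             else:
--                 player.append("H")
--
--             player.append(A_box_scores[i][6])
--             for j in range(7, len(A_box_scores[i])):
--                 player.append(A_box_scores[i][j])
--
--         elif len(A_box_scores[i]) == 26:
--             player.append(A_box_scores[i][0] + " " + A_box_scores[i][1] + " " +
--                           A_box_scores[i][2] + " " + A_box_scores[i][3])
--             player.append(A_box_scores[i][4])
--
--             if A_box_scores[i][6] == "@":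
--                 player.append("A")
--             else:
--                 player.append("H")
--
--             player.append(A_box_scores[i][7])
--             for j in range(8, len(A_box_scores[i])):
--                 player.append(A_box_scores[i][j])
--
--         A_box_scores[i] = player
--
--     return A_box_scores
-- ===== SOURCE B (Python) =====
-- def adv_format_rows(A_box_scores):
--     # Staged "consume until fixed residual shape": instead of dispatching on the
--     # row length, pop name tokens off the front (at most 4) until exactly 22
--     # fields remain; a row that cannot reach that fixed shape becomes [].
--     out = []
--     for row in A_box_scores:
--         rest = list(row)
--         name = []
--         while len(rest) > 22 and len(name) < 4:
--             name.append(rest.pop(0))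
--         if name and len(rest) == 22:
--             out.append([" ".join(name),
--                         rest[0],
--                         "A" if rest[2] == "@" else "H",
--                         rest[3]] + rest[4:])
--         else:
--             out.append([])
--     A_box_scores[:] = out
--     return A_box_scores
-- ===== Notes on version B (the rewrite author's own statement) =====
-- stated objective: alternative
-- what changed: B replaces A's four copy-pasted length-dispatch branches by a consume-until-fixed-shape pass: it pops up to four name tokens off the front of a working copy until exactly 22 fields remain, then emits the uniform row from that fixed residual shape, building a fresh output list that is spliced back into the argument.
import Mathlib
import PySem

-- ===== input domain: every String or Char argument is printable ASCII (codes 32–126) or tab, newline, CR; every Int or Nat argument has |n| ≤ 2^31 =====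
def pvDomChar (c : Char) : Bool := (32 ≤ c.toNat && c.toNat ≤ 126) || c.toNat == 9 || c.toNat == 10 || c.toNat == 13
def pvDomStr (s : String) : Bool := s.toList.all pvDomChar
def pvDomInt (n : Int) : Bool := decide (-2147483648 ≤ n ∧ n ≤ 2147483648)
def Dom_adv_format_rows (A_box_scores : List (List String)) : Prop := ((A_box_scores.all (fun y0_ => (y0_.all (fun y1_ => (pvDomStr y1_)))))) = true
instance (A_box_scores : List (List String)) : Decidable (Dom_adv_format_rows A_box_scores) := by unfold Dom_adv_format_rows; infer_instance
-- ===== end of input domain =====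

-- B replaces A's four length-dispatch branches by a consume-until-fixed-shape pass (pop up to 4 name
-- tokens until 22 fields remain); same return value. A mutates its argument in place and B splices
-- the fresh rows back the same way, so the observable effect matches; the theorem is about the return value.

-- ===== PORT A =====
-- per-row body of A's loop (A assigns A_box_scores[i] = player, so the loop is a map)
def advRowA (r : List String) : List String :=
  if r.length = 23 then
    let p := [PySem.List.pyGetD r 0 "", PySem.List.pyGetD r 1 ""]
    let p := p ++ [if PySem.List.pyGetD r 3 "" = "@" then "A" else "H"]
    let p := p ++ [PySem.List.pyGetD r 4 ""]
    (PySem.List.pyRange 5 (r.length : Int) 1).foldl (fun acc j => acc ++ [PySem.List.pyGetD r j ""]) p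
  else if r.length = 24 then
    let p := [PySem.List.pyGetD r 0 "" ++ " " ++ PySem.List.pyGetD r 1 "", PySem.List.pyGetD r 2 ""]
    let p := p ++ [if PySem.List.pyGetD r 4 "" = "@" then "A" else "H"]
    let p := p ++ [PySem.List.pyGetD r 5 ""]
    (PySem.List.pyRange 6 (r.length : Int) 1).foldl (fun acc j => acc ++ [PySem.List.pyGetD r j ""]) p
  else if r.length = 25 then
    let p := [PySem.List.pyGetD r 0 "" ++ " " ++ PySem.List.pyGetD r 1 "" ++ " " ++ PySem.List.pyGetD r 2 "", PySem.List.pyGetD r 3 ""]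
    let p := p ++ [if PySem.List.pyGetD r 5 "" = "@" then "A" else "H"]
    let p := p ++ [PySem.List.pyGetD r 6 ""]
    (PySem.List.pyRange 7 (r.length : Int) 1).foldl (fun acc j => acc ++ [PySem.List.pyGetD r j ""]) p
  else if r.length = 26 then
    let p := [PySem.List.pyGetD r 0 "" ++ " " ++ PySem.List.pyGetD r 1 "" ++ " " ++ PySem.List.pyGetD r 2 "" ++ " " ++ PySem.List.pyGetD r 3 "", PySem.List.pyGetD r 4 ""]
    let p := p ++ [if PySem.List.pyGetD r 6 "" = "@" then "A" else "H"]
    let p := p ++ [PySem.List.pyGetD r 7 ""]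
    (PySem.List.pyRange 8 (r.length : Int) 1).foldl (fun acc j => acc ++ [PySem.List.pyGetD r j ""]) p
  else []

def adv_format_rows (A_box_scores : List (List String)) : List (List String) :=
  A_box_scores.map advRowA

-- ===== PORT B =====
-- the while loop of Source B: pop tokens off the front of rest into name while len(rest) > 22 and len(name) < 4
def advConsume : List String → List String → List String × List String
  | name, [] => (name, [])
  | name, x :: t =>
      if (x :: t).length > 22 ∧ name.length < 4 then advConsume (name ++ [x]) t
      else (name, x :: t)

def advRowB (row : List String) : List String :=
  match advConsume [] row with
  | (name, rest) =>
    if name ≠ [] ∧ rest.length = 22 then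
      [PySem.Str.join " " name,
       PySem.List.pyGetD rest 0 "",
       if PySem.List.pyGetD rest 2 "" = "@" then "A" else "H",
       PySem.List.pyGetD rest 3 ""] ++ PySem.List.slice rest (some 4) none
    else []

def adv_format_rows_alt (A_box_scores : List (List String)) : List (List String) :=
  A_box_scores.foldl (fun out row => out ++ [advRowB row]) []

-- ===== PRECONDITION & SPEC =====
def Spec_adv_format_rows (A_box_scores : List (List String)) (out : List (List String)) : Prop := out = adv_format_rows_alt A_box_scores
instance (A_box_scores : List (List String)) (out : List (List String)) : Decidable (Spec_adv_format_rows A_box_scores out) := by unfold Spec_adv_format_rows; infer_instance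

-- ===== CLAIM (what is proved, stated in full; the proofs are below) =====
def Claim_equal_adv_format_rows : Prop := ∀ (A_box_scores : List (List String)), Dom_adv_format_rows A_box_scores → Spec_adv_format_rows A_box_scores (adv_format_rows A_box_scores)

-- ===== LEMMAS AND PROOFS =====
theorem ofList_space_cons (l : List Char) : String.ofList (' ' :: l) = " " ++ String.ofList l := by
  have h : (' ' :: l) = [' '] ++ l := rfl
  rw [h, String.ofList_append]

theorem advConsume_short (r : List String) (h : r.length ≤ 22) : advConsume [] r = ([], r) := by
  cases r with
  | nil => rfl
  | cons x t =>
    simp only [advConsume]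
    rw [if_neg (by simp only [List.length_cons]; simp only [List.length_cons] at h; omega)]

theorem advRow_eq_23 (r : List String) (h : r.length = 23) : advRowA r = advRowB r := by
  obtain ⟨a, r, rfl⟩ := List.exists_of_length_succ r (by omega)
  obtain ⟨b, r, rfl⟩ := List.exists_of_length_succ r (by simp at h; omega)
  obtain ⟨c, r, rfl⟩ := List.exists_of_length_succ r (by simp at h; omega)
  obtain ⟨d, r, rfl⟩ := List.exists_of_length_succ r (by simp at h; omega)
  obtain ⟨e, t, rfl⟩ := List.exists_of_length_succ r (by simp at h; omega)
  have ht : t.length = 18 := by simp at h; omega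
  have hfold : ∀ init : List String,
      (PySem.List.pyRange 5 ((a::b::c::d::e::t).length : Int) 1).foldl
        (fun acc j => acc ++ [PySem.List.pyGetD (a::b::c::d::e::t) j ""]) init = init ++ t := by
    intro init
    rw [PySem.List.foldl_pyRange_pyGetD' _ _ (fun acc x => acc ++ [x]) init (by norm_num)]
    simp [← List.flatMap_def]
  have hcons : advConsume [] (a::b::c::d::e::t) = ([a], b::c::d::e::t) := by
    simp only [advConsume]
    rw [if_pos (by simp only [List.length_cons, List.length_nil]; omega), if_neg (by simp only [List.length_cons, List.length_append, List.length_nil]; omega)]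
    rfl
  simp only [advRowA, advRowB, hcons]
  rw [hfold]
  norm_num [ht, PySem.List.pyGetD, PySem.List.pyIdx?, PySem.List.pyGet?,
        PySem.List.slice, PySem.List.clampIdx,
        PySem.Str.join, PySem.Chars.join_cons_cons, PySem.Chars.join_singleton,
        String.ofList_append, String.ofList_toList, ofList_space_cons, String.append_assoc]
  simp [List.take_of_length_le, ht,
        ]

theorem advRow_eq_24 (r : List String) (h : r.length = 24) : advRowA r = advRowB r := by
  obtain ⟨a, r, rfl⟩ := List.exists_of_length_succ r (by omega)
  obtain ⟨b, r, rfl⟩ := List.exists_of_length_succ r (by simp at h; omega)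
  obtain ⟨c, r, rfl⟩ := List.exists_of_length_succ r (by simp at h; omega)
  obtain ⟨d, r, rfl⟩ := List.exists_of_length_succ r (by simp at h; omega)
  obtain ⟨e, r, rfl⟩ := List.exists_of_length_succ r (by simp at h; omega)
  obtain ⟨f, t, rfl⟩ := List.exists_of_length_succ r (by simp at h; omega)
  have ht : t.length = 18 := by simp at h; omega
  have hfold : ∀ init : List String,
      (PySem.List.pyRange 6 ((a::b::c::d::e::f::t).length : Int) 1).foldl
        (fun acc j => acc ++ [PySem.List.pyGetD (a::b::c::d::e::f::t) j ""]) init = init ++ t := by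
    intro init
    rw [PySem.List.foldl_pyRange_pyGetD' _ _ (fun acc x => acc ++ [x]) init (by norm_num)]
    simp [← List.flatMap_def]
  have hcons : advConsume [] (a::b::c::d::e::f::t) = ([a, b], c::d::e::f::t) := by
    simp only [advConsume]
    rw [if_pos (by simp only [List.length_cons, List.length_nil]; omega), if_pos (by simp only [List.length_cons, List.length_append, List.length_nil]; omega),
        if_neg (by simp only [List.length_cons, List.length_append, List.length_nil]; omega)]
    rfl
  simp only [advRowA, advRowB, hcons]
  rw [hfold]
  norm_num [ht, PySem.List.pyGetD, PySem.List.pyIdx?, PySem.List.pyGet?,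
        PySem.List.slice, PySem.List.clampIdx,
        PySem.Str.join, PySem.Chars.join_cons_cons, PySem.Chars.join_singleton,
        String.ofList_append, String.ofList_toList, ofList_space_cons, String.append_assoc]
  simp [List.take_of_length_le, ht,
        ]

theorem advRow_eq_25 (r : List String) (h : r.length = 25) : advRowA r = advRowB r := by
  obtain ⟨a, r, rfl⟩ := List.exists_of_length_succ r (by omega)
  obtain ⟨b, r, rfl⟩ := List.exists_of_length_succ r (by simp at h; omega)
  obtain ⟨c, r, rfl⟩ := List.exists_of_length_succ r (by simp at h; omega)
  obtain ⟨d, r, rfl⟩ := List.exists_of_length_succ r (by simp at h; omega)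
  obtain ⟨e, r, rfl⟩ := List.exists_of_length_succ r (by simp at h; omega)
  obtain ⟨f, r, rfl⟩ := List.exists_of_length_succ r (by simp at h; omega)
  obtain ⟨g, t, rfl⟩ := List.exists_of_length_succ r (by simp at h; omega)
  have ht : t.length = 18 := by simp at h; omega
  have hfold : ∀ init : List String,
      (PySem.List.pyRange 7 ((a::b::c::d::e::f::g::t).length : Int) 1).foldl
        (fun acc j => acc ++ [PySem.List.pyGetD (a::b::c::d::e::f::g::t) j ""]) init = init ++ t := by
    intro init
    rw [PySem.List.foldl_pyRange_pyGetD' _ _ (fun acc x => acc ++ [x]) init (by norm_num)]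
    simp [← List.flatMap_def]
  have hcons : advConsume [] (a::b::c::d::e::f::g::t) = ([a, b, c], d::e::f::g::t) := by
    simp only [advConsume]
    rw [if_pos (by simp only [List.length_cons, List.length_nil]; omega), if_pos (by simp only [List.length_cons, List.length_append, List.length_nil]; omega),
        if_pos (by simp only [List.length_cons, List.length_append, List.length_nil]; omega), if_neg (by simp only [List.length_cons, List.length_append, List.length_nil]; omega)]
    rfl
  simp only [advRowA, advRowB, hcons]
  rw [hfold]
  norm_num [ht, PySem.List.pyGetD, PySem.List.pyIdx?, PySem.List.pyGet?,
        PySem.List.slice, PySem.List.clampIdx,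
        PySem.Str.join, PySem.Chars.join_cons_cons, PySem.Chars.join_singleton,
        String.ofList_append, String.ofList_toList, ofList_space_cons, String.append_assoc]
  simp [List.take_of_length_le, ht,
        ]

theorem advRow_eq_26 (r : List String) (h : r.length = 26) : advRowA r = advRowB r := by
  obtain ⟨a, r, rfl⟩ := List.exists_of_length_succ r (by omega)
  obtain ⟨b, r, rfl⟩ := List.exists_of_length_succ r (by simp at h; omega)
  obtain ⟨c, r, rfl⟩ := List.exists_of_length_succ r (by simp at h; omega)
  obtain ⟨d, r, rfl⟩ := List.exists_of_length_succ r (by simp at h; omega)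
  obtain ⟨e, r, rfl⟩ := List.exists_of_length_succ r (by simp at h; omega)
  obtain ⟨f, r, rfl⟩ := List.exists_of_length_succ r (by simp at h; omega)
  obtain ⟨g, r, rfl⟩ := List.exists_of_length_succ r (by simp at h; omega)
  obtain ⟨x, t, rfl⟩ := List.exists_of_length_succ r (by simp at h; omega)
  have ht : t.length = 18 := by simp at h; omega
  have hfold : ∀ init : List String,
      (PySem.List.pyRange 8 ((a::b::c::d::e::f::g::x::t).length : Int) 1).foldl
        (fun acc j => acc ++ [PySem.List.pyGetD (a::b::c::d::e::f::g::x::t) j ""]) init = init ++ t := by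
    intro init
    rw [PySem.List.foldl_pyRange_pyGetD' _ _ (fun acc x => acc ++ [x]) init (by norm_num)]
    simp [← List.flatMap_def]
  have hcons : advConsume [] (a::b::c::d::e::f::g::x::t) = ([a, b, c, d], e::f::g::x::t) := by
    simp only [advConsume]
    rw [if_pos (by simp only [List.length_cons, List.length_nil]; omega), if_pos (by simp only [List.length_cons, List.length_append, List.length_nil]; omega),
        if_pos (by simp only [List.length_cons, List.length_append, List.length_nil]; omega), if_pos (by simp only [List.length_cons, List.length_append, List.length_nil]; omega),
        if_neg (by simp only [List.length_cons, List.length_append, List.length_nil]; omega)]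
    rfl
  simp only [advRowA, advRowB, hcons]
  rw [hfold]
  norm_num [ht, PySem.List.pyGetD, PySem.List.pyIdx?, PySem.List.pyGet?,
        PySem.List.slice, PySem.List.clampIdx,
        PySem.Str.join, PySem.Chars.join_cons_cons, PySem.Chars.join_singleton,
        String.ofList_append, String.ofList_toList, ofList_space_cons, String.append_assoc]
  simp [List.take_of_length_le, ht,
        ]

theorem advRow_eq_long (r : List String) (h : 27 ≤ r.length) : advRowB r = [] := by
  obtain ⟨a, r, rfl⟩ := List.exists_of_length_succ r (show r.length = r.length - 1 + 1 by omega)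
  obtain ⟨b, r, rfl⟩ := List.exists_of_length_succ r (show r.length = r.length - 1 + 1 by
    simp only [List.length_cons] at h; omega)
  obtain ⟨c, r, rfl⟩ := List.exists_of_length_succ r (show r.length = r.length - 1 + 1 by
    simp only [List.length_cons] at h; omega)
  obtain ⟨d, r, rfl⟩ := List.exists_of_length_succ r (show r.length = r.length - 1 + 1 by
    simp only [List.length_cons] at h; omega)
  obtain ⟨y, u, rfl⟩ := List.exists_of_length_succ r (show r.length = r.length - 1 + 1 by
    simp only [List.length_cons] at h; omega)
  have ht : 23 ≤ (y :: u).length := by simp only [List.length_cons] at h ⊢; omega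
  have hcons : advConsume [] (a::b::c::d::y::u) = ([a, b, c, d], y::u) := by
    simp only [advConsume]
    rw [if_pos (by simp only [List.length_cons, List.length_nil] at ht ⊢; omega), if_pos (by simp only [List.length_cons, List.length_append, List.length_nil] at ht ⊢; omega),
        if_pos (by simp only [List.length_cons, List.length_append, List.length_nil] at ht ⊢; omega), if_pos (by simp only [List.length_cons, List.length_append, List.length_nil] at ht ⊢; omega),
        if_neg (by simp only [List.length_cons, List.length_append, List.length_nil]; omega)]
    rfl
  simp only [advRowB, hcons]
  rw [if_neg (by simp only [List.length_cons] at ht ⊢; omega)]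

theorem advRow_eq (r : List String) : advRowA r = advRowB r := by
  by_cases h23 : r.length = 23
  · exact advRow_eq_23 r h23
  by_cases h24 : r.length = 24
  · exact advRow_eq_24 r h24
  by_cases h25 : r.length = 25
  · exact advRow_eq_25 r h25
  by_cases h26 : r.length = 26
  · exact advRow_eq_26 r h26
  by_cases hs : r.length ≤ 22
  · simp [advRowA, advRowB, advConsume_short r hs, h23, h24, h25, h26]
  · rw [advRow_eq_long r (by omega)]
    simp [advRowA, h23, h24, h25, h26]

-- ===== VERDICT (by name: the statement is the Claim_ definition above) =====
theorem adv_format_rows_spec : Claim_equal_adv_format_rows := by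
  intro xs _
  unfold Spec_adv_format_rows adv_format_rows adv_format_rows_alt
  rw [PySem.List.foldl_append_singleton_eq_map]
  simp [advRow_eq]
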